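-- pv_equiv track=rewrite | github.com/pallavibakale/CampusPulse | test.py | find_ship
-- ===== SOURCE A (Python) =====
-- def find_ship(board):
--
--     visited = set()
--     ship_coords = []
--     rows = len(board)
--     cols = len(board[0])
--
--     def dfs(x, y):
--
--         if x < 0 or x >= rows or y < 0 or y >= cols:
--             return
--
--         if (x,y) in visited:
--             return
--
--         visited.add((x, y))
--
--         if board[x][y] == 1:
--             ship_coords.append((x, y))
--             dfs(x-1, y)
--             dfs(x+1, y)
--             dfs(x, y-1)
--             dfs(x, y+1)
--
--     for x in range(rows):
--         for y in range(cols):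
--
--             if board[x][y] == 1:
--                 dfs(x, y)
--
--     return ship_coords
-- ===== SOURCE B (Python) =====
-- def find_ship(board):
--     visited = set()
--     ship_coords = []
--     rows = len(board)
--     cols = len(board[0])
--
--     for sx in range(rows):
--         for sy in range(cols):
--             if board[sx][sy] != 1:
--                 continue
--             stack = [(sx, sy)]
--             while stack:
--                 x, y = stack.pop()
--                 if x < 0 or x >= rows or y < 0 or y >= cols:
--                     continue
--                 if (x, y) in visited:
--                     continue
--                 visited.add((x, y))
--                 if board[x][y] == 1:
--                     ship_coords.append((x, y))
--                     # pushed in reverse so they pop in up/down/left/right order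
--                     stack.extend([(x, y + 1), (x, y - 1), (x + 1, y), (x - 1, y)])
--     return ship_coords
-- ===== Notes on version B (the rewrite author's own statement) =====
-- stated objective: idiomatic
-- what changed: The recursive dfs helper is replaced by an explicit-stack iterative loop (pop a cell, apply the same guards with continue, push the four neighbours in reverse so they pop in the recursion's order), removing recursion entirely while producing the identical pre-order ship_coords list.
import Mathlib
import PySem

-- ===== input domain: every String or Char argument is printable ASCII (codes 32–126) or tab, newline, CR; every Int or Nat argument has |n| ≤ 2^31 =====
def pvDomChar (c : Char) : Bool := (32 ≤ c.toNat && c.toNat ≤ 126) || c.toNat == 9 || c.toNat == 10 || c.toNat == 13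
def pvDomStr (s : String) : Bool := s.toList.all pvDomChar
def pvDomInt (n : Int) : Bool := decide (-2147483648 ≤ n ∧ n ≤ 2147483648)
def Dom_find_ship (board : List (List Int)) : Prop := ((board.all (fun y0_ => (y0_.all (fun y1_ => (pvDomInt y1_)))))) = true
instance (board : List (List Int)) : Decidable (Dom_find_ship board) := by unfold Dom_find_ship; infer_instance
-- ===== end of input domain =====

-- B replaces A's recursive DFS helper by an explicit-stack loop (neighbours pushed in
-- reverse so they pop in A's recursion order); same traversal, iterative decomposition.

-- ===== PORT A =====

-- board[x][y]; total form of the double index (Pre_ guarantees both indexes are in range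
-- wherever the programs read a cell).
def fsCell (board : List (List Int)) (x y : Int) : Int :=
  PySem.List.pyGetD (PySem.List.pyGetD board x []) y 0

-- all in-bounds cells (x, y); only used to express termination measures.
def fsGrid (rows cols : Int) : List (Int × Int) :=
  (PySem.List.pyRange 0 rows 1).flatMap
    (fun x => (PySem.List.pyRange 0 cols 1).map (fun y => (x, y)))

-- number of in-bounds cells not yet visited (termination measure).
def fsUnseen (rows cols : Int) (v : PySem.Set (Int × Int)) : Nat :=
  ((fsGrid rows cols).filter (fun p => !(PySem.Set.contains v p))).length

-- A's recursive dfs, literal, with a fuel argument as a pure totality guard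
-- (rows*cols + 1 fuel is always enough; proved in fsDfs_eq_fsLoop below).
def fsDfs (board : List (List Int)) (rows cols : Int) :
    Nat → PySem.Set (Int × Int) → List (Int × Int) → Int → Int →
    PySem.Set (Int × Int) × List (Int × Int)
  | 0, v, c, _, _ => (v, c)
  | Nat.succ f, v, c, x, y =>
    if x < 0 ∨ rows ≤ x ∨ y < 0 ∨ cols ≤ y then (v, c)
    else if PySem.Set.contains v (x, y) then (v, c)
    else
      let v1 := PySem.Set.add v (x, y)
      if fsCell board x y == 1 then
        let r1 := fsDfs board rows cols f v1 (c ++ [(x, y)]) (x - 1) y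
        let r2 := fsDfs board rows cols f r1.1 r1.2 (x + 1) y
        let r3 := fsDfs board rows cols f r2.1 r2.2 x (y - 1)
        fsDfs board rows cols f r3.1 r3.2 x (y + 1)
      else (v1, c)

def find_ship (board : List (List Int)) : List (Int × Int) :=
  let rows : Int := board.length
  let cols : Int := (PySem.List.pyGetD board 0 ([] : List Int)).length
  let fuel : Nat := board.length * (PySem.List.pyGetD board 0 ([] : List Int)).length + 1
  ((PySem.List.pyRange 0 rows 1).foldl (fun st x =>
      (PySem.List.pyRange 0 cols 1).foldl (fun st y =>
        if fsCell board x y == 1 then fsDfs board rows cols fuel st.1 st.2 x y else st) st)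
    (PySem.Set.empty, ([] : List (Int × Int)))).2

-- ===== PORT B =====

-- termination facts for the stack loop: visiting an unseen in-bounds cell shrinks fsUnseen.
theorem fsFilter_add_le {α : Type} [BEq α] [LawfulBEq α] (l : List α) (v : PySem.Set α) (z : α) :
    (l.filter (fun p => !(PySem.Set.contains (PySem.Set.add v z) p))).length ≤
    (l.filter (fun p => !(PySem.Set.contains v p))).length := by
  induction l with
  | nil => simp
  | cons a l ih =>
    rw [List.filter_cons, List.filter_cons]
    cases hca : PySem.Set.contains v a with
    | true =>
      have hcb : PySem.Set.contains (PySem.Set.add v z) a = true :=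
        (PySem.Set.contains_iff _ _).mpr
          ((PySem.Set.mem_add v z a).mpr (Or.inl ((PySem.Set.contains_iff _ _).mp hca)))
      rw [hcb]
      simp only [Bool.not_true, Bool.false_eq_true, if_false]
      omega
    | false =>
      cases hcb : PySem.Set.contains (PySem.Set.add v z) a with
      | true =>
        simp only [Bool.not_true, Bool.not_false, Bool.false_eq_true, if_false, if_true,
          List.length_cons]
        omega
      | false =>
        simp only [Bool.not_false, if_true, List.length_cons]
        omega

theorem fsFilter_add_lt {α : Type} [BEq α] [LawfulBEq α] (l : List α) (v : PySem.Set α) (z : α)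
    (hz : z ∈ l) (hv : z ∉ v) :
    (l.filter (fun p => !(PySem.Set.contains (PySem.Set.add v z) p))).length <
    (l.filter (fun p => !(PySem.Set.contains v p))).length := by
  induction l with
  | nil => cases hz
  | cons a l ih =>
    rw [List.filter_cons, List.filter_cons]
    by_cases haz : a = z
    · subst haz
      have h1 : PySem.Set.contains v a = false := by
        cases hb : PySem.Set.contains v a
        · rfl
        · exact absurd ((PySem.Set.contains_iff _ _).mp hb) hv
      have h2 : PySem.Set.contains (PySem.Set.add v a) a = true :=
        (PySem.Set.contains_iff _ _).mpr ((PySem.Set.mem_add v a a).mpr (Or.inr rfl))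
      rw [h1, h2]
      have h := fsFilter_add_le l v a
      simp only [Bool.not_true, Bool.not_false, Bool.false_eq_true, if_false, if_true,
        List.length_cons]
      omega
    · have hmem : z ∈ l := by
        rcases List.mem_cons.mp hz with h | h
        · exact absurd h.symm haz
        · exact h
      have hc : PySem.Set.contains (PySem.Set.add v z) a = PySem.Set.contains v a := by
        by_cases hav : a ∈ v
        · rw [(PySem.Set.contains_iff _ _).mpr hav,
            (PySem.Set.contains_iff _ _).mpr ((PySem.Set.mem_add v z a).mpr (Or.inl hav))]
        · have hna : a ∉ PySem.Set.add v z := by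
            rw [PySem.Set.mem_add]; rintro (h | h)
            · exact hav h
            · exact haz h
          cases hb : PySem.Set.contains (PySem.Set.add v z) a
          · cases hb' : PySem.Set.contains v a
            · rfl
            · exact absurd ((PySem.Set.contains_iff _ _).mp hb') hav
          · exact absurd ((PySem.Set.contains_iff _ _).mp hb) hna
      rw [hc]
      have h := ih hmem
      cases hca : PySem.Set.contains v a with
      | true =>
        simp only [Bool.not_true, Bool.false_eq_true, if_false]
        omega
      | false =>
        simp only [Bool.not_false, if_true, List.length_cons]
        omega

theorem mem_fsGrid (rows cols x y : Int) :
    (x, y) ∈ fsGrid rows cols ↔ (0 ≤ x ∧ x < rows) ∧ (0 ≤ y ∧ y < cols) := by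
  simp only [fsGrid, List.mem_flatMap, List.mem_map, PySem.List.mem_pyRange_one,
    Prod.mk.injEq]
  constructor
  · rintro ⟨a, ha, b, hb, rfl, rfl⟩; exact ⟨ha, hb⟩
  · rintro ⟨hx, hy⟩; exact ⟨x, hx, y, hy, rfl, rfl⟩

theorem fsUnseen_add_lt (rows cols x y : Int) (v : PySem.Set (Int × Int))
    (hx0 : 0 ≤ x) (hx : x < rows) (hy0 : 0 ≤ y) (hy : y < cols) (hv : (x, y) ∉ v) :
    fsUnseen rows cols (PySem.Set.add v (x, y)) < fsUnseen rows cols v :=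
  fsFilter_add_lt _ _ _ ((mem_fsGrid rows cols x y).mpr ⟨⟨hx0, hx⟩, ⟨hy0, hy⟩⟩) hv

-- B's explicit-stack loop; the stack is modelled head-is-top (Python pops from the end,
-- and B pushes the four neighbours in reverse, so the head-cons order below is exact).
def fsLoop (board : List (List Int)) (rows cols : Int) :
    PySem.Set (Int × Int) → List (Int × Int) → List (Int × Int) →
    PySem.Set (Int × Int) × List (Int × Int)
  | v, c, [] => (v, c)
  | v, c, (x, y) :: rest =>
    if x < 0 ∨ rows ≤ x ∨ y < 0 ∨ cols ≤ y then fsLoop board rows cols v c rest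
    else if PySem.Set.contains v (x, y) then fsLoop board rows cols v c rest
    else if fsCell board x y == 1 then
      fsLoop board rows cols (PySem.Set.add v (x, y)) (c ++ [(x, y)])
        ((x - 1, y) :: (x + 1, y) :: (x, y - 1) :: (x, y + 1) :: rest)
    else fsLoop board rows cols (PySem.Set.add v (x, y)) c rest
  termination_by v _ s => 4 * fsUnseen rows cols v + s.length
  decreasing_by
  · simp only [List.length_cons]; omega
  · simp only [List.length_cons]; omega
  · rename_i h hv _
    have hnv : (x, y) ∉ v := fun hm => hv ((PySem.Set.contains_iff v (x, y)).mpr hm)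
    have := fsUnseen_add_lt rows cols x y v (by omega) (by omega) (by omega) (by omega) hnv
    simp only [List.length_cons]; omega
  · rename_i h hv _
    have hnv : (x, y) ∉ v := fun hm => hv ((PySem.Set.contains_iff v (x, y)).mpr hm)
    have := fsUnseen_add_lt rows cols x y v (by omega) (by omega) (by omega) (by omega) hnv
    simp only [List.length_cons]; omega

def find_ship_alt (board : List (List Int)) : List (Int × Int) :=
  let rows : Int := board.length
  let cols : Int := (PySem.List.pyGetD board 0 ([] : List Int)).length
  ((PySem.List.pyRange 0 rows 1).foldl (fun st x =>
      (PySem.List.pyRange 0 cols 1).foldl (fun st y =>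
        if fsCell board x y == 1 then fsLoop board rows cols st.1 st.2 [(x, y)] else st) st)
    (PySem.Set.empty, ([] : List (Int × Int)))).2

-- ===== PRECONDITION & SPEC =====
-- Pre_ excludes exactly the inputs where Python A raises IndexError: the empty board
-- (len(board[0])) and ragged boards with some row shorter than the first row.
def Pre_find_ship (board : List (List Int)) : Prop :=
  board ≠ [] ∧ ∀ row ∈ board, (PySem.List.pyGetD board 0 ([] : List Int)).length ≤ row.length
instance (board : List (List Int)) : Decidable (Pre_find_ship board) := by
  unfold Pre_find_ship; infer_instance

def pvWitness_find_ship : List (List Int) := [[1, 1, 0], [0, 0, 1]]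

def Spec_find_ship (board : List (List Int)) (out : List (Int × Int)) : Prop :=
  out = find_ship_alt board
instance (board : List (List Int)) (out : List (Int × Int)) : Decidable (Spec_find_ship board out) := by
  unfold Spec_find_ship; infer_instance

-- ===== CLAIM (what is proved, stated in full; the proofs are below) =====
def Claim_equal_find_ship : Prop := ∀ (board : List (List Int)), Dom_find_ship board →
  Pre_find_ship board → Spec_find_ship board (find_ship board)

-- ===== LEMMAS AND PROOFS =====

theorem fsUnseen_add_le (rows cols : Int) (v : PySem.Set (Int × Int)) (z : Int × Int) :
    fsUnseen rows cols (PySem.Set.add v z) ≤ fsUnseen rows cols v :=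
  fsFilter_add_le _ _ _

-- one-step unfolding lemmas for the well-founded fsLoop
theorem fsLoop_nil (board : List (List Int)) (rows cols : Int)
    (v : PySem.Set (Int × Int)) (c : List (Int × Int)) :
    fsLoop board rows cols v c [] = (v, c) := by
  rw [fsLoop.eq_def]

theorem fsLoop_cons (board : List (List Int)) (rows cols : Int)
    (v : PySem.Set (Int × Int)) (c : List (Int × Int)) (x y : Int) (rest : List (Int × Int)) :
    fsLoop board rows cols v c ((x, y) :: rest) =
      if x < 0 ∨ rows ≤ x ∨ y < 0 ∨ cols ≤ y then fsLoop board rows cols v c rest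
      else if PySem.Set.contains v (x, y) then fsLoop board rows cols v c rest
      else if fsCell board x y == 1 then
        fsLoop board rows cols (PySem.Set.add v (x, y)) (c ++ [(x, y)])
          ((x - 1, y) :: (x + 1, y) :: (x, y - 1) :: (x, y + 1) :: rest)
      else fsLoop board rows cols (PySem.Set.add v (x, y)) c rest := by
  rw [fsLoop.eq_def]

-- the visited set never shrinks during the stack loop
theorem fsLoop_unseen_le (board : List (List Int)) (rows cols : Int)
    (v : PySem.Set (Int × Int)) (c s : List (Int × Int)) :
    fsUnseen rows cols (fsLoop board rows cols v c s).1 ≤ fsUnseen rows cols v := by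
  fun_induction fsLoop board rows cols v c s with
  | case1 v c => exact le_refl _
  | case2 v c x y rest h ih => exact ih
  | case3 v c x y rest h hv ih => exact ih
  | case4 v c x y rest h hv h1 ih =>
      exact le_trans ih (fsUnseen_add_le rows cols v (x, y))
  | case5 v c x y rest h hv h1 ih =>
      exact le_trans ih (fsUnseen_add_le rows cols v (x, y))

-- running the stack loop on s₁ ++ s₂ = run it on s₁, then on s₂ from the resulting state
theorem fsLoop_append (board : List (List Int)) (rows cols : Int)
    (v : PySem.Set (Int × Int)) (c s₁ s₂ : List (Int × Int)) :
    fsLoop board rows cols v c (s₁ ++ s₂) =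
      fsLoop board rows cols (fsLoop board rows cols v c s₁).1
        (fsLoop board rows cols v c s₁).2 s₂ := by
  induction hgen : (4 * fsUnseen rows cols v + s₁.length) using Nat.strong_induction_on
    generalizing v c s₁ with
  | _ n ihn =>
  subst hgen
  match s₁ with
  | [] => rw [List.nil_append, fsLoop_nil]
  | (x, y) :: rest =>
    rw [List.cons_append]
    by_cases h : x < 0 ∨ rows ≤ x ∨ y < 0 ∨ cols ≤ y
    · conv_lhs => rw [fsLoop_cons, if_pos h]
      conv_rhs => rw [fsLoop_cons, if_pos h]
      exact ihn _ (by simp only [List.length_cons]; omega) v c rest rfl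
    · by_cases hv : PySem.Set.contains v (x, y) = true
      · conv_lhs => rw [fsLoop_cons, if_neg h, if_pos hv]
        conv_rhs => rw [fsLoop_cons, if_neg h, if_pos hv]
        exact ihn _ (by simp only [List.length_cons]; omega) v c rest rfl
      · have hnm : (x, y) ∉ v := fun hm => hv ((PySem.Set.contains_iff _ _).mpr hm)
        have h' := h
        simp only [not_or, not_lt, not_le] at h'
        have hlt : fsUnseen rows cols (PySem.Set.add v (x, y)) < fsUnseen rows cols v :=
          fsUnseen_add_lt rows cols x y v (by omega) (by omega) (by omega) (by omega) hnm
        by_cases h1 : (fsCell board x y == 1) = true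
        · conv_lhs => rw [fsLoop_cons, if_neg h, if_neg hv, if_pos h1]
          conv_rhs => rw [fsLoop_cons, if_neg h, if_neg hv, if_pos h1]
          rw [show ((x - 1, y) :: (x + 1, y) :: (x, y - 1) :: (x, y + 1) :: (rest ++ s₂)) =
            ((x - 1, y) :: (x + 1, y) :: (x, y - 1) :: (x, y + 1) :: rest) ++ s₂ from rfl]
          exact ihn _ (by simp only [List.length_cons]; omega) _ _ _ rfl
        · conv_lhs => rw [fsLoop_cons, if_neg h, if_neg hv, if_neg h1]
          conv_rhs => rw [fsLoop_cons, if_neg h, if_neg hv, if_neg h1]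
          exact ihn _ (by simp only [List.length_cons]; omega) _ _ rest rfl

-- with enough fuel, A's recursive dfs equals B's stack loop started on the singleton stack
theorem fsDfs_eq_fsLoop (board : List (List Int)) (rows cols : Int) :
    ∀ (f : Nat) (v : PySem.Set (Int × Int)) (c : List (Int × Int)) (x y : Int),
      fsUnseen rows cols v < f →
      fsDfs board rows cols f v c x y = fsLoop board rows cols v c [(x, y)] := by
  intro f
  induction f with
  | zero => intro v c x y h; omega
  | succ f ih =>
    intro v c x y hf
    by_cases h : x < 0 ∨ rows ≤ x ∨ y < 0 ∨ cols ≤ y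
    · conv_lhs => rw [fsDfs, if_pos h]
      conv_rhs => rw [fsLoop_cons, if_pos h, fsLoop_nil]
    · by_cases hv : PySem.Set.contains v (x, y) = true
      · conv_lhs => rw [fsDfs, if_neg h, if_pos hv]
        conv_rhs => rw [fsLoop_cons, if_neg h, if_pos hv, fsLoop_nil]
      · have hnm : (x, y) ∉ v := fun hm => hv ((PySem.Set.contains_iff _ _).mpr hm)
        have h' := h
        simp only [not_or, not_lt, not_le] at h'
        have hlt : fsUnseen rows cols (PySem.Set.add v (x, y)) < fsUnseen rows cols v :=
          fsUnseen_add_lt rows cols x y v (by omega) (by omega) (by omega) (by omega) hnm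
        by_cases h1 : (fsCell board x y == 1) = true
        · conv_lhs => rw [fsDfs, if_neg h, if_neg hv, if_pos h1]
          conv_rhs => rw [fsLoop_cons, if_neg h, if_neg hv, if_pos h1]
          set v1 := PySem.Set.add v (x, y) with hv1
          set c1 := c ++ [(x, y)] with hc1
          have hf1 : fsUnseen rows cols v1 < f := by omega
          rw [show ((x - 1, y) :: (x + 1, y) :: (x, y - 1) :: (x, y + 1) :: ([] : List (Int × Int))) =
              [(x - 1, y)] ++ ([(x + 1, y)] ++ ([(x, y - 1)] ++ [(x, y + 1)])) from rfl]
          rw [fsLoop_append, fsLoop_append, fsLoop_append]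
          rw [← ih v1 c1 (x - 1) y hf1]
          set r1 := fsDfs board rows cols f v1 c1 (x - 1) y with hr1
          have hm1 : fsUnseen rows cols r1.1 ≤ fsUnseen rows cols v1 := by
            rw [hr1, ih v1 c1 (x - 1) y hf1]; exact fsLoop_unseen_le _ _ _ _ _ _
          rw [← ih r1.1 r1.2 (x + 1) y (by omega)]
          set r2 := fsDfs board rows cols f r1.1 r1.2 (x + 1) y with hr2
          have hm2 : fsUnseen rows cols r2.1 ≤ fsUnseen rows cols r1.1 := by
            rw [hr2, ih r1.1 r1.2 (x + 1) y (by omega)]; exact fsLoop_unseen_le _ _ _ _ _ _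
          rw [← ih r2.1 r2.2 x (y - 1) (by omega)]
          set r3 := fsDfs board rows cols f r2.1 r2.2 x (y - 1) with hr3
          have hm3 : fsUnseen rows cols r3.1 ≤ fsUnseen rows cols r2.1 := by
            rw [hr3, ih r2.1 r2.2 x (y - 1) (by omega)]; exact fsLoop_unseen_le _ _ _ _ _ _
          rw [← ih r3.1 r3.2 x (y + 1) (by omega)]
        · conv_lhs => rw [fsDfs, if_neg h, if_neg hv, if_neg h1]
          conv_rhs => rw [fsLoop_cons, if_neg h, if_neg hv, if_neg h1, fsLoop_nil]

-- fsUnseen is bounded by rows*cols, so the fuel in find_ship always suffices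
theorem fsUnseen_lt_fuel (board : List (List Int)) (v : PySem.Set (Int × Int)) :
    fsUnseen (board.length : Int) ((PySem.List.pyGetD board 0 ([] : List Int)).length : Int) v <
      board.length * (PySem.List.pyGetD board 0 ([] : List Int)).length + 1 := by
  have h1 : fsUnseen (board.length : Int)
      ((PySem.List.pyGetD board 0 ([] : List Int)).length : Int) v ≤
      (fsGrid (board.length : Int)
        ((PySem.List.pyGetD board 0 ([] : List Int)).length : Int)).length :=
    List.length_filter_le _ _
  have h2 : (fsGrid (board.length : Int)
      ((PySem.List.pyGetD board 0 ([] : List Int)).length : Int)).length =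
      board.length * (PySem.List.pyGetD board 0 ([] : List Int)).length := by
    simp [fsGrid, List.length_flatMap, PySem.List.length_pyRange_one, List.map_const',
      List.sum_replicate, smul_eq_mul]
  omega

-- ===== VERDICT (by name: the statement is the Claim_ definition above) =====
theorem find_ship_spec : Claim_equal_find_ship := by
  unfold Claim_equal_find_ship
  intro board _ _
  unfold Spec_find_ship find_ship find_ship_alt
  have hstep : (fun (st : PySem.Set (Int × Int) × List (Int × Int)) (x : Int) =>
      (PySem.List.pyRange 0 ((PySem.List.pyGetD board 0 ([] : List Int)).length : Int) 1).foldl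
        (fun st y =>
          if fsCell board x y == 1 then
            fsDfs board (board.length : Int)
              ((PySem.List.pyGetD board 0 ([] : List Int)).length : Int)
              (board.length * (PySem.List.pyGetD board 0 ([] : List Int)).length + 1)
              st.1 st.2 x y
          else st) st) =
      (fun (st : PySem.Set (Int × Int) × List (Int × Int)) (x : Int) =>
      (PySem.List.pyRange 0 ((PySem.List.pyGetD board 0 ([] : List Int)).length : Int) 1).foldl
        (fun st y =>
          if fsCell board x y == 1 then
            fsLoop board (board.length : Int)
              ((PySem.List.pyGetD board 0 ([] : List Int)).length : Int) st.1 st.2 [(x, y)]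
          else st) st) := by
    funext st x
    have hinner : ∀ (y : Int) (st : PySem.Set (Int × Int) × List (Int × Int)),
        (if fsCell board x y == 1 then
            fsDfs board (board.length : Int)
              ((PySem.List.pyGetD board 0 ([] : List Int)).length : Int)
              (board.length * (PySem.List.pyGetD board 0 ([] : List Int)).length + 1)
              st.1 st.2 x y
          else st) =
        (if fsCell board x y == 1 then
            fsLoop board (board.length : Int)
              ((PySem.List.pyGetD board 0 ([] : List Int)).length : Int) st.1 st.2 [(x, y)]
          else st) := by
      intro y st
      by_cases h1 : (fsCell board x y == 1) = true
      · rw [if_pos h1, if_pos h1]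
        exact fsDfs_eq_fsLoop board _ _ _ st.1 st.2 x y (fsUnseen_lt_fuel board st.1)
      · rw [if_neg h1, if_neg h1]
    simp only [hinner]
  simp only [hstep]
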